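-- pv_equiv track=rewrite | github.com/coughe/issue-forge | scripts/emit_phase1.py | _normalize_yaml_for_indented_inline_mappings
-- ===== SOURCE A (Python) =====
-- def _normalize_yaml_for_indented_inline_mappings(yaml_text: str) -> str:
--     # Only used as a fallback when PyYAML rejects input.
--     # Converts lines like "<indent>- key: value" into:
--     #   <indent>-
--     #   <indent><4 spaces>key: value
--     fixed_lines: list[str] = []
--     for line in yaml_text.splitlines():
--         stripped = line.lstrip(" ")
--         if not stripped.startswith("- "):
--             fixed_lines.append(line)
--             continue
--
--         after_dash = stripped[2:]
--         colon_index = after_dash.find(":")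
--         if colon_index <= 0:
--             fixed_lines.append(line)
--             continue
--
--         key = after_dash[:colon_index]
--         rest = after_dash[colon_index + 1 :]
--         if not key or any(ch.isspace() for ch in key):
--             fixed_lines.append(line)
--             continue
--
--         indent = " " * (len(line) - len(stripped))
--         fixed_lines.append(f"{indent}-")
--         fixed_lines.append(f"{indent}    {key}:{rest}")
--
--     return "\n".join(fixed_lines) + ("\n" if yaml_text.endswith("\n") else "")
-- ===== SOURCE B (Python) =====
-- def _normalize_yaml_for_indented_inline_mappings(yaml_text: str) -> str:
--     # Streaming scanner over the raw text: no splitlines()/join(); lines are cut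
--     # at the terminators themselves ("\n", "\r", "\r\n") and output is emitted
--     # as we go, so the trailing-newline rule falls out of the last terminator.
--     def fix(line: str) -> str:
--         head = line.lstrip(" ")
--         if not head.startswith("- "):
--             return line
--         key, colon, rest = head[2:].partition(":")
--         if not colon or not key or any(ch.isspace() for ch in key):
--             return line
--         indent = line[: len(line) - len(head)]
--         return indent + "-\n" + indent + "    " + key + ":" + rest
--
--     out = []
--     i, n = 0, len(yaml_text)
--     while True:
--         j = i
--         while j < n and yaml_text[j] not in "\r\n":
--             j += 1
--         out.append(fix(yaml_text[i:j]))
--         if j == n: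
--             break
--         i = j + (2 if yaml_text[j] == "\r" and j + 1 < n and yaml_text[j + 1] == "\n" else 1)
--         if i == n:
--             if yaml_text[n - 1] == "\n":
--                 out.append("\n")
--             break
--         out.append("\n")
--     return "".join(out)
-- ===== Notes on version B (the rewrite author's own statement) =====
-- stated objective: alternative
-- what changed: A splits the text into a list of lines, rewrites each into a list of fixed lines and joins them with a separately recomputed trailing-newline flag; B is a streaming scanner over the raw text that cuts each line at its terminator ('\n', '\r', '\r\n'), fixes it with a partition-based helper and emits output as it goes, so the trailing newline falls out of the last terminator.
import Mathlib
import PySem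

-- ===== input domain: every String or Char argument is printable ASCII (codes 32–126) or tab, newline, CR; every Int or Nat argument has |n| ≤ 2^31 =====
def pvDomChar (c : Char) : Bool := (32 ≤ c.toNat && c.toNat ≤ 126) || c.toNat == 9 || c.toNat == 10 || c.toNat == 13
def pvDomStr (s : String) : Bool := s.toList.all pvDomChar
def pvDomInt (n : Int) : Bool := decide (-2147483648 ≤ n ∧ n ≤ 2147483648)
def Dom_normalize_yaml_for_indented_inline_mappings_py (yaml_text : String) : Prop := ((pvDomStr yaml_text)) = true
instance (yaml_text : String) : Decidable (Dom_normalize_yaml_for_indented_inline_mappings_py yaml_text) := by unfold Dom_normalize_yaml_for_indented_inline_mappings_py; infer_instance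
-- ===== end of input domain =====

-- B replaces A's splitlines/list/"\n".join pipeline by a streaming scanner over the raw
-- text (lines cut at "\n"/"\r"/"\r\n" with output emitted as it goes, the trailing-newline
-- rule read off the last terminator) and a partition-based line fixer; objective: alternative.

-- ===== PORT A =====
-- per-line body of A's loop: the lines appended for one input line
def pvAFix (line : List Char) : List (List Char) :=
  let stripped := line.dropWhile (fun c => c == ' ')      -- line.lstrip(" "): drops exactly the leading ' ' chars (exact)
  if PySem.Chars.startswith stripped ['-', ' '] = false then [line]
  else
    let after_dash := PySem.Chars.slice stripped (some 2) none
    let colon_index := PySem.Chars.find after_dash [':']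
    if colon_index ≤ 0 then [line]
    else
      let key := PySem.Chars.slice after_dash none (some colon_index)
      let rest := PySem.Chars.slice after_dash (some (colon_index + 1)) none
      if key = [] ∨ key.any PySem.Chars.isspace then [line]
      else
        let indent := List.replicate (line.length - stripped.length) ' '
        [indent ++ ['-'], indent ++ [' ', ' ', ' ', ' '] ++ key ++ [':'] ++ rest]

def normalize_yaml_for_indented_inline_mappings_py (yaml_text : String) : String :=
  let fixed_lines := (PySem.Chars.splitlines yaml_text.toList).foldl (fun acc line => acc ++ pvAFix line) []
  String.ofList (PySem.Chars.join ['\n'] fixed_lines ++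
    (if PySem.Chars.endswith yaml_text.toList ['\n'] = true then ['\n'] else []))

-- ===== PORT B =====
-- Source B's `head[2:].partition(":")` (single-char separator): (before, found?, after)
def pvPartitionColon : List Char → List Char × Bool × List Char
  | [] => ([], false, [])
  | c :: cs =>
    if c == ':' then ([], true, cs)
    else
      let p := pvPartitionColon cs
      (c :: p.1, p.2.1, p.2.2)

-- Source B's fix(line)
def pvBFix (line : List Char) : List Char :=
  let head := line.dropWhile (fun c => c == ' ')          -- line.lstrip(" ")
  if PySem.Chars.startswith head ['-', ' '] = false then line
  else
    let p := pvPartitionColon (PySem.Chars.slice head (some 2) none)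
    if p.2.1 = false ∨ p.1 = [] ∨ p.1.any PySem.Chars.isspace then line
    else
      let indent := PySem.Chars.slice line none (some ((line.length - head.length : Nat) : Int))
      indent ++ ['-', '\n'] ++ indent ++ [' ', ' ', ' ', ' '] ++ p.1 ++ [':'] ++ p.2.2

-- Source B's outer `while True` loop: cut the next line at the terminator, emit, recurse
def pvBGo (s : List Char) : List Char :=
  let line := s.takeWhile (fun c => !(c == '\r' || c == '\n'))     -- inner scan: yaml_text[j] not in "\r\n"
  match h : s.dropWhile (fun c => !(c == '\r' || c == '\n')) with
  | [] => pvBFix line                                               -- j == n: last segment, no terminator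
  | '\r' :: '\n' :: rest =>
    pvBFix line ++ (if rest = [] then ['\n'] else '\n' :: pvBGo rest)
  | '\n' :: rest =>
    pvBFix line ++ (if rest = [] then ['\n'] else '\n' :: pvBGo rest)
  | '\r' :: rest =>
    pvBFix line ++ (if rest = [] then [] else '\n' :: pvBGo rest)   -- bare '\r' at end: no trailing newline
  | _ :: _ => pvBFix line                                           -- unreachable: dropWhile's head is '\r' or '\n'
termination_by s.length
decreasing_by all_goals
  { have hle := List.length_dropWhile_le (fun c => !(c == '\r' || c == '\n')) s
    rw [h] at hle; simp at hle; omega }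

def normalize_yaml_for_indented_inline_mappings_py_alt (yaml_text : String) : String :=
  String.ofList (pvBGo yaml_text.toList)

-- ===== PRECONDITION & SPEC =====
def Spec_normalize_yaml_for_indented_inline_mappings_py (yaml_text : String) (out : String) : Prop := out = normalize_yaml_for_indented_inline_mappings_py_alt yaml_text
instance (yaml_text : String) (out : String) : Decidable (Spec_normalize_yaml_for_indented_inline_mappings_py yaml_text out) := by unfold Spec_normalize_yaml_for_indented_inline_mappings_py; infer_instance

-- ===== CLAIM (what is proved, stated in full; the proofs are below) =====
def Claim_equal_normalize_yaml_for_indented_inline_mappings_py : Prop := ∀ (yaml_text : String), Dom_normalize_yaml_for_indented_inline_mappings_py yaml_text → Spec_normalize_yaml_for_indented_inline_mappings_py yaml_text (normalize_yaml_for_indented_inline_mappings_py yaml_text)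

-- ===== LEMMAS AND PROOFS =====

-- ---- splitlines characterised as an accumulator-free recursion ----
def pvIsBstd (c : Char) : Bool :=
  decide (c.toNat = 10) || decide (c.toNat = 13) || decide (c.toNat = 11) || decide (c.toNat = 12) ||
    decide (c.toNat = 28) || decide (c.toNat = 29) || decide (c.toNat = 30) || decide (c.toNat = 133) ||
    decide (c.toNat = 8232) || decide (c.toNat = 8233)

def pvGlue : List Char → List Char → List (List Char)
  | cur, [] => if cur.isEmpty then [] else [cur.reverse]
  | cur, '\r' :: '\n' :: rest => cur.reverse :: pvGlue [] rest
  | cur, c :: rest => if pvIsBstd c then cur.reverse :: pvGlue [] rest else pvGlue (c :: cur) rest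

theorem go_cons (isB : Char → Bool) (c : Char) (rest cur : List Char) (acc : List (List Char))
    (hne : ∀ r', ¬(c = '\r' ∧ rest = '\n' :: r')) :
    PySem.Chars.splitlines.go isB (c :: rest) cur acc =
      if isB c then PySem.Chars.splitlines.go isB rest [] (cur.reverse :: acc)
      else PySem.Chars.splitlines.go isB rest (c :: cur) acc := by
  rw [PySem.Chars.splitlines.go.eq_def]
  split
  · rename_i h; exact absurd h (by simp)
  · rename_i h; obtain ⟨h1, h2⟩ := List.cons_eq_cons.mp h; exact (hne _ ⟨h1, h2⟩).elim
  · rename_i h; obtain ⟨h1, h2⟩ := List.cons_eq_cons.mp h; subst h1; subst h2; rfl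

theorem glue_cons (c : Char) (rest cur : List Char)
    (hne : ∀ r', ¬(c = '\r' ∧ rest = '\n' :: r')) :
    pvGlue cur (c :: rest) =
      if pvIsBstd c then cur.reverse :: pvGlue [] rest else pvGlue (c :: cur) rest := by
  rw [pvGlue.eq_def]
  split
  · rename_i h; exact absurd h (by simp)
  · rename_i h; obtain ⟨h1, h2⟩ := List.cons_eq_cons.mp h; exact (hne _ ⟨h1, h2⟩).elim
  · rename_i h; obtain ⟨h1, h2⟩ := List.cons_eq_cons.mp h; subst h1; subst h2; rfl

theorem L_go : ∀ cur s acc, PySem.Chars.splitlines.go pvIsBstd s cur acc = acc.reverse ++ pvGlue cur s := by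
  intro cur s
  induction cur, s using pvGlue.induct with
  | case1 cur h => intro acc; rw [PySem.Chars.splitlines.go, pvGlue]; simp_all [List.isEmpty_iff]
  | case2 cur h => intro acc; rw [PySem.Chars.splitlines.go, pvGlue]; simp_all [List.isEmpty_iff]
  | case3 cur rest ih => intro acc; rw [PySem.Chars.splitlines.go, pvGlue]; simp [ih]
  | case4 cur c rest hne hB ih =>
    intro acc
    rw [go_cons _ _ _ _ _ (fun r' ⟨a, b⟩ => hne r' a b), glue_cons _ _ _ (fun r' ⟨a, b⟩ => hne r' a b),
      if_pos hB, if_pos hB, ih]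
    simp
  | case5 cur c rest hne hB ih =>
    intro acc
    rw [go_cons _ _ _ _ _ (fun r' ⟨a, b⟩ => hne r' a b), glue_cons _ _ _ (fun r' ⟨a, b⟩ => hne r' a b),
      if_neg hB, if_neg hB, ih]

theorem splitlines_eq_glue (s : List Char) : PySem.Chars.splitlines s = pvGlue [] s := by
  have h : PySem.Chars.splitlines s = PySem.Chars.splitlines.go pvIsBstd s [] [] := rfl
  rw [h, L_go]; rfl


-- ---- per-line equivalence: A's appended lines, joined, are B's fix ----
theorem infix_singleton (c : Char) (s : List Char) : [c] <:+: s ↔ c ∈ s := by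
  constructor
  · rintro ⟨p, q, h⟩
    rw [← h]; simp
  · intro h
    obtain ⟨p, q, rfl⟩ := List.append_of_mem h
    exact ⟨p, q, by simp⟩

theorem prefix_singleton (c : Char) (s : List Char) : [c] <+: s ↔ ∃ t, s = c :: t := by
  cases s with
  | nil => simp
  | cons a t => simp [List.cons_prefix_cons, eq_comm]

theorem find_first_colon (k r : List Char) (hk : (':' : Char) ∉ k) :
    PySem.Chars.find (k ++ ':' :: r) [':'] = (k.length : Int) := by
  have hmem : (':' : Char) ∈ k ++ ':' :: r := by simp
  have hne : PySem.Chars.find (k ++ ':' :: r) [':'] ≠ -1 := by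
    rw [Ne, PySem.Chars.find_eq_neg_one_iff]
    intro h
    exact h ((infix_singleton _ _).mpr hmem)
  have hlo : (-1 : Int) ≤ PySem.Chars.find (k ++ ':' :: r) [':'] := PySem.Chars.neg_one_le_find _ _
  have hge : (0 : Int) ≤ PySem.Chars.find (k ++ ':' :: r) [':'] := by omega
  obtain ⟨hpre, hmin⟩ := PySem.Chars.find_spec hge
  set n := (PySem.Chars.find (k ++ ':' :: r) [':']).toNat with hn
  have h1 : ¬ k.length < n := by
    intro hlt
    have hp : [(':' : Char)] <+: (k ++ ':' :: r).drop k.length := by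
      rw [List.drop_left]
      exact (prefix_singleton _ _).mpr ⟨r, rfl⟩
    exact hmin k.length hlt hp
  have h2 : ¬ n < k.length := by
    intro hlt
    have hd : (k ++ ':' :: r).drop n = k.drop n ++ ':' :: r :=
      List.drop_append_of_le_length (le_of_lt hlt)
    rw [hd] at hpre
    obtain ⟨a, t, he⟩ : ∃ a t, k.drop n = a :: t := by
      cases h : k.drop n with
      | nil =>
        have := List.drop_eq_nil_iff.mp h
        omega
      | cons a t => exact ⟨a, t, rfl⟩
    rw [he] at hpre
    obtain ⟨t', ht'⟩ := (prefix_singleton _ _).mp hpre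
    have ha : a = ':' := by
      have hcc : a :: (t ++ ':' :: r) = ':' :: t' := by simpa using ht'
      exact (List.cons_eq_cons.mp hcc).1
    have hmem2 : a ∈ k := List.mem_of_mem_drop (he ▸ List.mem_cons_self ..)
    exact hk (ha ▸ hmem2)
  have hnk : n = k.length := by omega
  omega

theorem find_no_colon (s : List Char) (h : (':' : Char) ∉ s) :
    PySem.Chars.find s [':'] = -1 := by
  rw [PySem.Chars.find_eq_neg_one_iff]
  intro hin
  exact h ((infix_singleton _ _).mp hin)

theorem partition_found : ∀ (u k r : List Char), pvPartitionColon u = (k, true, r) →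
    u = k ++ ':' :: r ∧ (':' : Char) ∉ k := by
  intro u
  induction u with
  | nil => intro k r h; simp [pvPartitionColon] at h
  | cons c cs ih =>
    intro k r h
    by_cases hc : c == ':'
    · have hc' : c = ':' := by simpa using hc
      simp only [pvPartitionColon, hc, if_pos, Prod.mk.injEq] at h
      obtain ⟨h1, _, h3⟩ := h
      subst h1; subst h3
      simp [hc']
    · simp only [pvPartitionColon, hc, Bool.false_eq_true, if_false] at h
      rcases hcs : pvPartitionColon cs with ⟨k', f', r'⟩
      rw [hcs] at h
      simp only [Prod.mk.injEq] at h
      obtain ⟨h1, h2, h3⟩ := h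
      obtain ⟨hb, hni⟩ := ih k' r (by rw [hcs, h2, h3])
      subst h1
      refine ⟨by simp [hb], ?_⟩
      simp only [List.mem_cons, not_or]
      exact ⟨fun e => hc (by rw [← e]; decide), hni⟩

theorem partition_not_found : ∀ (u k r : List Char), pvPartitionColon u = (k, false, r) →
    k = u ∧ (':' : Char) ∉ u := by
  intro u
  induction u with
  | nil =>
    intro k r h
    simp only [pvPartitionColon, Prod.mk.injEq] at h
    simp [← h.1]
  | cons c cs ih =>
    intro k r h
    by_cases hc : c == ':'
    · simp [pvPartitionColon, hc] at h
    · simp only [pvPartitionColon, hc, Bool.false_eq_true, if_false] at h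
      rcases hcs : pvPartitionColon cs with ⟨k', f', r'⟩
      rw [hcs] at h
      simp only [Prod.mk.injEq] at h
      obtain ⟨h1, h2, h3⟩ := h
      obtain ⟨hk', hni⟩ := ih k' r (by rw [hcs, h2, h3])
      subst h1
      refine ⟨by simp [hk'], ?_⟩
      simp only [List.mem_cons, not_or]
      exact ⟨fun e => hc (by rw [← e]; decide), hni⟩

theorem indent_slice (line : List Char) :
    PySem.Chars.slice line none
        (some (((line.length - (line.dropWhile (fun c => c == ' ')).length : Nat) : Int))) =
      List.replicate (line.length - (line.dropWhile (fun c => c == ' ')).length) ' ' := by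
  set n := line.length - (line.dropWhile (fun c => c == ' ')).length with hn
  rw [PySem.Chars.slice_eq_listSlice, PySem.List.slice_to _ (by omega : (0 : Int) ≤ (n : Int))]
  have hlen : (line.takeWhile (fun c => c == ' ')).length = n := by
    have := congrArg List.length (List.takeWhile_append_dropWhile (p := fun c => c == ' ') (l := line))
    simp only [List.length_append] at this
    omega
  have htake : line.take ((n : Int)).toNat = line.takeWhile (fun c => c == ' ') := by
    have hp := List.takeWhile_prefix (l := line) (p := fun c => c == ' ')
    have h2 := List.prefix_iff_eq_take.mp hp
    rw [hlen] at h2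
    have h3 : ((n : Int)).toNat = n := by omega
    rw [h3, ← h2]
  rw [htake]
  rw [List.eq_replicate_iff]
  refine ⟨hlen, ?_⟩
  intro b hb
  have := List.mem_takeWhile_imp hb
  simpa using this

theorem lineEq (line : List Char) : PySem.Chars.join ['\n'] (pvAFix line) = pvBFix line := by
  simp only [pvAFix, pvBFix]
  by_cases hsw : PySem.Chars.startswith (line.dropWhile (fun c => c == ' ')) ['-', ' '] = false
  · rw [if_pos hsw, if_pos hsw, PySem.Chars.join_singleton]
  · rw [if_neg hsw, if_neg hsw]
    rcases hp : pvPartitionColon (PySem.Chars.slice (line.dropWhile (fun c => c == ' ')) (some 2) none)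
      with ⟨k, f, r⟩
    cases f with
    | false =>
      obtain ⟨hk, hnotin⟩ := partition_not_found _ _ _ hp
      rw [find_no_colon _ hnotin, if_pos (by norm_num : (-1 : Int) ≤ 0),
        if_pos (by simp), PySem.Chars.join_singleton]
    | true =>
      obtain ⟨hb, hnotin⟩ := partition_found _ _ _ hp
      rw [hb, find_first_colon k r hnotin]
      by_cases hk0 : k = []
      · subst hk0
        rw [if_pos (by simp), if_pos (by simp), PySem.Chars.join_singleton]
      · have hkpos : 0 < k.length := List.length_pos_iff.mpr hk0
        rw [if_neg (by exact_mod_cast by omega : ¬ ((k.length : Int) ≤ 0))]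
        have hkey : PySem.Chars.slice (k ++ ':' :: r) none (some ((k.length : Int))) = k := by
          rw [PySem.Chars.slice_eq_listSlice,
            PySem.List.slice_to _ (by omega : (0 : Int) ≤ ((k.length : Int)))]
          simp
        have hrest : PySem.Chars.slice (k ++ ':' :: r) (some ((k.length : Int) + 1)) none = r := by
          rw [PySem.Chars.slice_eq_listSlice,
            PySem.List.slice_from _ (by omega : (0 : Int) ≤ ((k.length : Int) + 1))]
          have ht : (((k.length : Int) + 1)).toNat = k.length + 1 := by omega
          rw [ht, show k ++ ':' :: r = (k ++ [':']) ++ r by simp,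
            show k.length + 1 = (k ++ [':']).length by simp, List.drop_left]
        rw [hkey, hrest]
        by_cases hsp : k.any PySem.Chars.isspace
        · rw [if_pos (Or.inr hsp), if_pos (by simp [hsp]), PySem.Chars.join_singleton]
        · rw [if_neg (by simp [hk0, hsp]), if_neg (by simp [hk0, hsp]),
            PySem.Chars.join_cons_cons, PySem.Chars.join_singleton, indent_slice]
          simp [List.append_assoc]

-- ---- A's foldl-append over splitlines as flatMap, then as map of pvBFix ----
theorem pvAFix_ne_nil (line : List Char) : pvAFix line ≠ [] := by
  simp only [pvAFix]
  split_ifs <;> simp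

theorem join_append (sep : List Char) (xs ys : List (List Char))
    (hx : xs ≠ []) (hy : ys ≠ []) :
    PySem.Chars.join sep (xs ++ ys) =
      PySem.Chars.join sep xs ++ sep ++ PySem.Chars.join sep ys := by
  induction xs with
  | nil => exact absurd rfl hx
  | cons p xs ih =>
    cases xs with
    | nil =>
      cases ys with
      | nil => exact absurd rfl hy
      | cons y ys' =>
        simp [PySem.Chars.join_cons_cons, PySem.Chars.join_singleton]
    | cons q xs' =>
      rw [List.cons_append, List.cons_append, PySem.Chars.join_cons_cons,
        ← List.cons_append, ih (by simp), PySem.Chars.join_cons_cons]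
      simp [List.append_assoc]

theorem flatMap_pvAFix_ne_nil (ls : List (List Char)) (h : ls ≠ []) :
    ls.flatMap pvAFix ≠ [] := by
  cases ls with
  | nil => exact absurd rfl h
  | cons l ls =>
    simp only [List.flatMap_cons]
    intro hab
    exact pvAFix_ne_nil l (List.append_eq_nil_iff.mp hab).1

theorem join_flatMap (ls : List (List Char)) :
    PySem.Chars.join ['\n'] (ls.flatMap pvAFix) =
      PySem.Chars.join ['\n'] (ls.map pvBFix) := by
  induction ls with
  | nil => rfl
  | cons l ls ih =>
    cases ls with
    | nil =>
      simp only [List.flatMap_cons, List.flatMap_nil, List.append_nil, List.map_cons,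
        List.map_nil]
      rw [PySem.Chars.join_singleton, lineEq]
    | cons m ms =>
      rw [List.flatMap_cons,
        join_append _ _ _ (pvAFix_ne_nil l) (flatMap_pvAFix_ne_nil _ (by simp)),
        lineEq, ih]
      simp [List.map_cons, PySem.Chars.join_cons_cons, List.append_assoc]

-- ---- glue facts under the domain ----
theorem isB_cr : pvIsBstd '\r' = true := by decide

theorem isB_of_dom_false (c : Char) (hdom : pvDomChar c = true) (h1 : c ≠ '\r') (h2 : c ≠ '\n') :
    pvIsBstd c = false := by
  have e1 : c.toNat ≠ 13 := fun e => h1 (Char.ext (UInt32.toNat_inj.mp e))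
  have e2 : c.toNat ≠ 10 := fun e => h2 (Char.ext (UInt32.toNat_inj.mp e))
  simp only [pvDomChar, Bool.or_eq_true, Bool.and_eq_true, decide_eq_true_eq, beq_iff_eq] at hdom
  simp only [pvIsBstd, Bool.or_eq_false_iff, decide_eq_false_iff_not]
  omega

theorem glue_take : ∀ (line t cur : List Char), (∀ c ∈ line, pvIsBstd c = false) →
    pvGlue cur (line ++ t) = pvGlue (line.reverse ++ cur) t := by
  intro line
  induction line with
  | nil => intro t cur h; simp
  | cons c cs ih =>
    intro t cur h
    have hc : pvIsBstd c = false := h c List.mem_cons_self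
    have hcr : c ≠ '\r' := fun e => by rw [e] at hc; exact absurd hc (by decide)
    rw [List.cons_append, glue_cons c _ _ (fun r' ⟨a, _⟩ => hcr a), if_neg (by simp [hc]),
      ih _ _ (fun d hd => h d (List.mem_cons_of_mem _ hd))]
    simp

theorem glue_nil (cur : List Char) : pvGlue cur [] = if cur.isEmpty then [] else [cur.reverse] := by
  rw [pvGlue]

theorem glue_crlf (cur rest : List Char) :
    pvGlue cur ('\r' :: '\n' :: rest) = cur.reverse :: pvGlue [] rest := by
  rw [pvGlue]

theorem glue_ne_nil : ∀ cur s, (cur ≠ [] ∨ s ≠ []) → pvGlue cur s ≠ [] := by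
  intro cur s
  induction cur, s using pvGlue.induct with
  | case1 cur h =>
    intro hor
    rcases hor with h' | h'
    · exact absurd (List.isEmpty_iff.mp h) h'
    · exact absurd rfl h'
  | case2 cur h => intro _; rw [glue_nil, if_neg h]; simp
  | case3 cur rest ih => intro _; rw [pvGlue]; simp
  | case4 cur c rest hne hB ih =>
    intro _
    rw [glue_cons c _ _ (fun r' ⟨a, b⟩ => hne r' a b), if_pos hB]
    simp
  | case5 cur c rest hne hB ih =>
    intro _
    rw [glue_cons c _ _ (fun r' ⟨a, b⟩ => hne r' a b), if_neg (by simp [hB])]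
    exact ih (Or.inl (by simp))

theorem suffix_singleton_iff (c : Char) (s : List Char) : [c] <:+ s ↔ s.getLast? = some c := by
  constructor
  · rintro ⟨t, rfl⟩; exact List.getLast?_concat ..
  · intro h
    have hne : s ≠ [] := by rintro rfl; simp at h
    refine ⟨s.dropLast, ?_⟩
    have h2 := List.dropLast_append_getLast hne
    rw [List.getLast?_eq_some_getLast hne] at h
    have h3 : s.getLast hne = c := by simpa using h
    rw [← h3]
    exact h2

theorem endswith_nl_true (s : List Char) (h : s.getLast? = some '\n') :
    PySem.Chars.endswith s ['\n'] = true :=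
  (PySem.Chars.endswith_iff _ _).mpr ((suffix_singleton_iff _ _).mpr h)

theorem endswith_nl_false (s : List Char) (h : s.getLast? ≠ some '\n') :
    PySem.Chars.endswith s ['\n'] = false := by
  rw [← Bool.not_eq_true, PySem.Chars.endswith_iff]
  exact fun hs => h ((suffix_singleton_iff _ _).mp hs)

theorem getLast?_append_right (pre r : List Char) (h : r ≠ []) :
    (pre ++ r).getLast? = r.getLast? := by
  cases hg : r.getLast? with
  | none => exact absurd (List.getLast?_eq_none_iff.mp hg) h
  | some a => rw [List.getLast?_append, hg]; rfl

theorem pred_dropWhile_head (p : Char → Bool) :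
    ∀ (l : List Char) c t, l.dropWhile p = c :: t → p c = false := by
  intro l
  induction l with
  | nil => intro c t h; simp at h
  | cons a as ih =>
    intro c t h
    by_cases hp : p a = true
    · rw [List.dropWhile_cons_of_pos hp] at h; exact ih _ _ h
    · rw [List.dropWhile_cons_of_neg hp] at h
      obtain ⟨h1, h2⟩ := List.cons_eq_cons.mp h
      subst h1; simpa using hp

-- equation lemmas for pvBGo, one per terminator shape
theorem pvBGo_eq_nil (x : List Char)
    (h : x.dropWhile (fun c => !(c == '\r' || c == '\n')) = []) :
    pvBGo x = pvBFix (x.takeWhile (fun c => !(c == '\r' || c == '\n'))) := by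
  rw [pvBGo]
  split
  next heq => rfl
  next r heq => rw [h] at heq; try cases heq
  next r heq => rw [h] at heq; try cases heq
  next r hnx heq => rw [h] at heq; try cases heq
  next hd0 tl hnn hnr heq => rw [h] at heq; try cases heq

theorem pvBGo_eq_crlf (x rest : List Char)
    (h : x.dropWhile (fun c => !(c == '\r' || c == '\n')) = '\r' :: '\n' :: rest) :
    pvBGo x = pvBFix (x.takeWhile (fun c => !(c == '\r' || c == '\n'))) ++
      (if rest = [] then ['\n'] else '\n' :: pvBGo rest) := by
  rw [pvBGo]
  split
  next heq => rw [h] at heq; try cases heq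
  next r heq =>
    rw [h] at heq
    obtain ⟨h1, h2⟩ := List.cons_eq_cons.mp heq
    obtain ⟨h3, h4⟩ := List.cons_eq_cons.mp h2
    rw [h4]
  next r heq =>
    rw [h] at heq
    obtain ⟨h1, -⟩ := List.cons_eq_cons.mp heq
    exact absurd h1 (by decide)
  next r hnx heq =>
    rw [h] at heq
    obtain ⟨-, h2⟩ := List.cons_eq_cons.mp heq
    exact absurd h2.symm (hnx rest)
  next hd0 tl hnn hnr heq =>
    rw [h] at heq
    obtain ⟨h1, -⟩ := List.cons_eq_cons.mp heq
    exact absurd h1.symm hnr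

theorem pvBGo_eq_lf (x rest : List Char)
    (h : x.dropWhile (fun c => !(c == '\r' || c == '\n')) = '\n' :: rest) :
    pvBGo x = pvBFix (x.takeWhile (fun c => !(c == '\r' || c == '\n'))) ++
      (if rest = [] then ['\n'] else '\n' :: pvBGo rest) := by
  rw [pvBGo]
  split
  next heq => rw [h] at heq; try cases heq
  next r heq =>
    rw [h] at heq
    obtain ⟨h1, -⟩ := List.cons_eq_cons.mp heq
    exact absurd h1 (by decide)
  next r heq =>
    rw [h] at heq
    obtain ⟨h1, h2⟩ := List.cons_eq_cons.mp heq
    rw [h2]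
  next r hnx heq =>
    rw [h] at heq
    obtain ⟨h1, -⟩ := List.cons_eq_cons.mp heq
    exact absurd h1 (by decide)
  next hd0 tl hnn hnr heq =>
    rw [h] at heq
    obtain ⟨h1, -⟩ := List.cons_eq_cons.mp heq
    exact absurd h1.symm hnn

theorem pvBGo_eq_cr (x rest : List Char)
    (h : x.dropWhile (fun c => !(c == '\r' || c == '\n')) = '\r' :: rest)
    (hne : ∀ r', rest ≠ '\n' :: r') :
    pvBGo x = pvBFix (x.takeWhile (fun c => !(c == '\r' || c == '\n'))) ++
      (if rest = [] then [] else '\n' :: pvBGo rest) := by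
  rw [pvBGo]
  split
  next heq => rw [h] at heq; try cases heq
  next r heq =>
    rw [h] at heq
    obtain ⟨-, h2⟩ := List.cons_eq_cons.mp heq
    exact absurd h2 (hne r)
  next r heq =>
    rw [h] at heq
    obtain ⟨h1, -⟩ := List.cons_eq_cons.mp heq
    exact absurd h1 (by decide)
  next r hnx heq =>
    rw [h] at heq
    obtain ⟨h1, h2⟩ := List.cons_eq_cons.mp heq
    rw [h2]
  next hd0 tl hnn hnr heq =>
    rw [h] at heq
    obtain ⟨h1, -⟩ := List.cons_eq_cons.mp heq
    exact absurd h1.symm hnr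

-- ---- main streaming lemma: pvBGo computes join-of-fixed-glue-lines plus the trailing rule ----
theorem main_eq (s : List Char) (hd : s.all pvDomChar = true) :
    pvBGo s =
      PySem.Chars.join ['\n'] ((pvGlue [] s).map pvBFix) ++
        (if PySem.Chars.endswith s ['\n'] = true then ['\n'] else []) := by
  induction s using pvBGo.induct with
  | case1 x hdrop =>
    set line := x.takeWhile (fun c => !(c == '\r' || c == '\n')) with hline
    have hx : x = line := by
      rw [hline]
      conv_lhs => rw [← List.takeWhile_append_dropWhile
        (p := fun c => !(c == '\r' || c == '\n')) (l := x), hdrop]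
      simp
    have hlineFalse : ∀ c ∈ line, pvIsBstd c = false := by
      intro c hc
      have hc2 : c ∈ List.takeWhile (fun c => !(c == '\r' || c == '\n')) x := by
        rw [← hline]; exact hc
      have hpc := List.mem_takeWhile_imp hc2
      simp only [Bool.not_eq_eq_eq_not, Bool.not_true, Bool.or_eq_false_iff, beq_eq_false_iff_ne,
        ne_eq] at hpc
      have hcr : c ≠ '\r' := hpc.1
      have hcn : c ≠ '\n' := hpc.2
      have hdomc : pvDomChar c = true := (List.all_eq_true.mp hd) c (by rw [hx]; exact hc)
      exact isB_of_dom_false c hdomc hcr hcn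
    have hglue : pvGlue [] x = if line.isEmpty then [] else [line] := by
      conv_lhs => rw [hx]
      rw [show (line : List Char) = line ++ [] by simp, glue_take _ _ _ hlineFalse, glue_nil]
      simp
    rw [pvBGo_eq_nil x hdrop, ← hline, hglue]
    by_cases hl : line = []
    · rw [hl]
      have hxnil : x = [] := by rw [hx, hl]
      rw [hxnil]
      decide
    · rw [if_neg (by simp [hl]), List.map_cons, List.map_nil, PySem.Chars.join_singleton]
      have hend : PySem.Chars.endswith x ['\n'] = false := by
        apply endswith_nl_false
        intro hlast
        have hmem : ('\n' : Char) ∈ line := by rw [hx] at hlast; exact List.mem_of_getLast? hlast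
        have hm2 : ('\n' : Char) ∈ List.takeWhile (fun c => !(c == '\r' || c == '\n')) x := by
          rw [← hline]; exact hmem
        have := List.mem_takeWhile_imp hm2
        simp at this
      rw [hend]
      simp only [Bool.false_eq_true, if_false, List.append_nil]
  | case2 x rest hdrop ih =>
    set line := x.takeWhile (fun c => !(c == '\r' || c == '\n')) with hline
    have hx : x = line ++ '\r' :: '\n' :: rest := by
      rw [hline]
      conv_lhs => rw [← List.takeWhile_append_dropWhile
        (p := fun c => !(c == '\r' || c == '\n')) (l := x), hdrop]
    have hlineFalse : ∀ c ∈ line, pvIsBstd c = false := by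
      intro c hc
      have hc2 : c ∈ List.takeWhile (fun c => !(c == '\r' || c == '\n')) x := by
        rw [← hline]; exact hc
      have hpc := List.mem_takeWhile_imp hc2
      simp only [Bool.not_eq_eq_eq_not, Bool.not_true, Bool.or_eq_false_iff, beq_eq_false_iff_ne,
        ne_eq] at hpc
      have hcr : c ≠ '\r' := hpc.1
      have hcn : c ≠ '\n' := hpc.2
      have hdomc : pvDomChar c = true := (List.all_eq_true.mp hd) c
        (by rw [hx]; exact List.mem_append_left _ hc)
      exact isB_of_dom_false c hdomc hcr hcn
    have hdrest : rest.all pvDomChar = true := by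
      rw [List.all_eq_true]
      intro c hc
      exact (List.all_eq_true.mp hd) c (by rw [hx]; simp [hc])
    have hglue : pvGlue [] x = line :: pvGlue [] rest := by
      conv_lhs => rw [hx]
      rw [glue_take _ _ _ hlineFalse]
      simp only [List.append_nil]
      rw [glue_crlf]
      simp
    rw [pvBGo_eq_crlf x rest hdrop, ← hline, hglue]
    by_cases hr : rest = []
    · rw [if_pos hr, hr, glue_nil]
      have hend : PySem.Chars.endswith x ['\n'] = true := by
        apply endswith_nl_true
        rw [hx, hr, show line ++ ['\r', '\n'] = (line ++ ['\r']) ++ ['\n'] by simp]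
        exact List.getLast?_concat ..
      rw [hend]
      simp [PySem.Chars.join_singleton]
    · rw [if_neg hr]
      obtain ⟨g, gs, hg⟩ : ∃ g gs, pvGlue [] rest = g :: gs := by
        cases hgl : pvGlue [] rest with
        | nil => exact absurd hgl (glue_ne_nil [] rest (Or.inr hr))
        | cons g gs => exact ⟨g, gs, rfl⟩
      have hend : PySem.Chars.endswith x ['\n'] = PySem.Chars.endswith rest ['\n'] := by
        rw [hx, show line ++ '\r' :: '\n' :: rest = (line ++ ['\r', '\n']) ++ rest by simp]
        by_cases hlast : rest.getLast? = some '\n'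
        · rw [endswith_nl_true _ hlast, endswith_nl_true]
          rw [getLast?_append_right _ _ hr]
          exact hlast
        · rw [endswith_nl_false _ hlast, endswith_nl_false]
          rw [getLast?_append_right _ _ hr]
          exact hlast
      rw [hend, ih hdrest, hg]
      simp only [List.map_cons, PySem.Chars.join_cons_cons]
      simp [List.append_assoc]
  | case3 x rest hdrop ih =>
    set line := x.takeWhile (fun c => !(c == '\r' || c == '\n')) with hline
    have hx : x = line ++ '\n' :: rest := by
      rw [hline]
      conv_lhs => rw [← List.takeWhile_append_dropWhile
        (p := fun c => !(c == '\r' || c == '\n')) (l := x), hdrop]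
    have hlineFalse : ∀ c ∈ line, pvIsBstd c = false := by
      intro c hc
      have hc2 : c ∈ List.takeWhile (fun c => !(c == '\r' || c == '\n')) x := by
        rw [← hline]; exact hc
      have hpc := List.mem_takeWhile_imp hc2
      simp only [Bool.not_eq_eq_eq_not, Bool.not_true, Bool.or_eq_false_iff, beq_eq_false_iff_ne,
        ne_eq] at hpc
      have hcr : c ≠ '\r' := hpc.1
      have hcn : c ≠ '\n' := hpc.2
      have hdomc : pvDomChar c = true := (List.all_eq_true.mp hd) c
        (by rw [hx]; exact List.mem_append_left _ hc)
      exact isB_of_dom_false c hdomc hcr hcn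
    have hdrest : rest.all pvDomChar = true := by
      rw [List.all_eq_true]
      intro c hc
      exact (List.all_eq_true.mp hd) c (by rw [hx]; simp [hc])
    have hglue : pvGlue [] x = line :: pvGlue [] rest := by
      conv_lhs => rw [hx]
      rw [glue_take _ _ _ hlineFalse]
      simp only [List.append_nil]
      rw [glue_cons '\n' _ _ (by rintro r' ⟨ha, _⟩; cases ha), if_pos (by decide)]
      simp
    rw [pvBGo_eq_lf x rest hdrop, ← hline, hglue]
    by_cases hr : rest = []
    · rw [if_pos hr, hr, glue_nil]
      have hend : PySem.Chars.endswith x ['\n'] = true := by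
        apply endswith_nl_true
        rw [hx, hr]
        exact List.getLast?_concat ..
      rw [hend]
      simp [PySem.Chars.join_singleton]
    · rw [if_neg hr]
      obtain ⟨g, gs, hg⟩ : ∃ g gs, pvGlue [] rest = g :: gs := by
        cases hgl : pvGlue [] rest with
        | nil => exact absurd hgl (glue_ne_nil [] rest (Or.inr hr))
        | cons g gs => exact ⟨g, gs, rfl⟩
      have hend : PySem.Chars.endswith x ['\n'] = PySem.Chars.endswith rest ['\n'] := by
        rw [hx, show line ++ '\n' :: rest = (line ++ ['\n']) ++ rest by simp]
        by_cases hlast : rest.getLast? = some '\n'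
        · rw [endswith_nl_true _ hlast, endswith_nl_true]
          rw [getLast?_append_right _ _ hr]
          exact hlast
        · rw [endswith_nl_false _ hlast, endswith_nl_false]
          rw [getLast?_append_right _ _ hr]
          exact hlast
      rw [hend, ih hdrest, hg]
      simp only [List.map_cons, PySem.Chars.join_cons_cons]
      simp [List.append_assoc]
  | case4 x rest hnlf hdrop ih =>
    set line := x.takeWhile (fun c => !(c == '\r' || c == '\n')) with hline
    have hx : x = line ++ '\r' :: rest := by
      rw [hline]
      conv_lhs => rw [← List.takeWhile_append_dropWhile
        (p := fun c => !(c == '\r' || c == '\n')) (l := x), hdrop]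
    have hlineFalse : ∀ c ∈ line, pvIsBstd c = false := by
      intro c hc
      have hc2 : c ∈ List.takeWhile (fun c => !(c == '\r' || c == '\n')) x := by
        rw [← hline]; exact hc
      have hpc := List.mem_takeWhile_imp hc2
      simp only [Bool.not_eq_eq_eq_not, Bool.not_true, Bool.or_eq_false_iff, beq_eq_false_iff_ne,
        ne_eq] at hpc
      have hcr : c ≠ '\r' := hpc.1
      have hcn : c ≠ '\n' := hpc.2
      have hdomc : pvDomChar c = true := (List.all_eq_true.mp hd) c
        (by rw [hx]; exact List.mem_append_left _ hc)
      exact isB_of_dom_false c hdomc hcr hcn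
    have hdrest : rest.all pvDomChar = true := by
      rw [List.all_eq_true]
      intro c hc
      exact (List.all_eq_true.mp hd) c (by rw [hx]; simp [hc])
    have hglue : pvGlue [] x = line :: pvGlue [] rest := by
      conv_lhs => rw [hx]
      rw [glue_take _ _ _ hlineFalse]
      simp only [List.append_nil]
      rw [glue_cons '\r' _ _ (by rintro r' ⟨_, hb⟩; exact hnlf r' hb), if_pos isB_cr]
      simp
    rw [pvBGo_eq_cr x rest hdrop (fun r' hb => hnlf r' hb), ← hline, hglue]
    by_cases hr : rest = []
    · rw [if_pos hr, hr, glue_nil]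
      have hend : PySem.Chars.endswith x ['\n'] = false := by
        apply endswith_nl_false
        rw [hx, hr, List.getLast?_concat]
        decide
      rw [hend]
      simp [PySem.Chars.join_singleton]
    · rw [if_neg hr]
      obtain ⟨g, gs, hg⟩ : ∃ g gs, pvGlue [] rest = g :: gs := by
        cases hgl : pvGlue [] rest with
        | nil => exact absurd hgl (glue_ne_nil [] rest (Or.inr hr))
        | cons g gs => exact ⟨g, gs, rfl⟩
      have hend : PySem.Chars.endswith x ['\n'] = PySem.Chars.endswith rest ['\n'] := by
        rw [hx, show line ++ '\r' :: rest = (line ++ ['\r']) ++ rest by simp]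
        by_cases hlast : rest.getLast? = some '\n'
        · rw [endswith_nl_true _ hlast, endswith_nl_true]
          rw [getLast?_append_right _ _ hr]
          exact hlast
        · rw [endswith_nl_false _ hlast, endswith_nl_false]
          rw [getLast?_append_right _ _ hr]
          exact hlast
      rw [hend, ih hdrest, hg]
      simp only [List.map_cons, PySem.Chars.join_cons_cons]
      simp [List.append_assoc]
  | case5 x hd' tl hne h1 h2 hdrop =>
    exfalso
    have hp := pred_dropWhile_head _ x hd' tl hdrop
    simp only [Bool.not_eq_eq_eq_not, Bool.not_false, Bool.or_eq_true, beq_iff_eq] at hp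
    rcases hp with h | h
    · exact h2 h
    · exact h1 h

-- ===== VERDICT (by name: the statement is the Claim_ definition above) =====
theorem normalize_yaml_for_indented_inline_mappings_py_spec : Claim_equal_normalize_yaml_for_indented_inline_mappings_py := by
  intro yaml_text hdom
  unfold Spec_normalize_yaml_for_indented_inline_mappings_py
  simp only [normalize_yaml_for_indented_inline_mappings_py,
    normalize_yaml_for_indented_inline_mappings_py_alt]
  rw [PySem.List.foldl_append_eq_flatMap]
  simp only [List.nil_append]
  rw [join_flatMap, splitlines_eq_glue, main_eq _ hdom]
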